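-- pv_equiv track=rewrite | github.com/rsmanjunath/Python-Algorithms | usb.py | usb
-- ===== SOURCE A (Python) =====
-- def usb(key,drives,b):
--     count = []
--     for i in range(len(key)):
--         for j in range(len(drives)):
--             if key[i] + drives[j] <= b:
--                 count.append(key[i] + drives[j])
--     if len(count) == 0:
--         return -1
--     else:
--         return max(count)
-- ===== SOURCE B (Python) =====
-- def usb(key, drives, b):
--     # sort drives descending: for each key the first drive d with k + d <= b is the best one
--     ds = sorted(drives, reverse=True)
--     best = None
--     for k in key:
--         d = next((d for d in ds if d <= b - k), None)
--         if d is not None and (best is None or best < k + d):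
--             best = k + d
--     return -1 if best is None else best
-- ===== Notes on version B (the rewrite author's own statement) =====
-- stated objective: faster
-- what changed: Instead of materialising the list of all qualifying pair sums and taking its max, B sorts the drives once in descending order, picks for each key the first (hence largest) drive that fits the budget via an early-exit scan, and keeps a running maximum; no intermediate list is built.
import Mathlib
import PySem

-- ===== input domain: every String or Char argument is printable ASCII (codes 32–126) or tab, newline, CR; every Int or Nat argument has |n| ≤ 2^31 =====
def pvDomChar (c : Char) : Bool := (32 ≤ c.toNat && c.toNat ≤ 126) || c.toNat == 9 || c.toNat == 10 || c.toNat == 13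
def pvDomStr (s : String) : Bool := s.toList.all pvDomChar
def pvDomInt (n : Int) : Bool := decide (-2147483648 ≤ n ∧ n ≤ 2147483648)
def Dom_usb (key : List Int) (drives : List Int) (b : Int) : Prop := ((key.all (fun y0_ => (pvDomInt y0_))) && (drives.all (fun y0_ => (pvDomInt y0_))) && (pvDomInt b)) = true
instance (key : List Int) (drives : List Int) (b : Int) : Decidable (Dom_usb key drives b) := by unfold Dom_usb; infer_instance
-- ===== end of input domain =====

-- B sorts the drives once in descending order, takes per key the first drive that fits the
-- budget, and keeps a running maximum, instead of A's building the list of all qualifying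
-- pair sums and taking its max (objective: alternative algorithm, no intermediate list).

-- ===== PORT A =====
def usb (key : List Int) (drives : List Int) (b : Int) : Int :=
  let count : List Int :=
    (PySem.List.pyRange 0 (PySem.List.len key)).foldl (fun acc i =>
      (PySem.List.pyRange 0 (PySem.List.len drives)).foldl (fun acc2 j =>
        if PySem.List.pyGetD key i 0 + PySem.List.pyGetD drives j 0 ≤ b then
          acc2 ++ [PySem.List.pyGetD key i 0 + PySem.List.pyGetD drives j 0]
        else acc2) acc) []
  if count.length = 0 then -1
  else
    match PySem.List.max? count (fun x => x) with
    | some m => m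
    | none => -1

-- ===== PORT B =====
-- one step of B's loop over `key`: first (= largest) sorted-descending drive fitting the budget
def usbStep (b : Int) (ds : List Int) (best : Option Int) (k : Int) : Option Int :=
  match ds.find? (fun d => decide (d ≤ b - k)) with
  | none => best
  | some d =>
    match best with
    | none => some (k + d)
    | some m => if m < k + d then some (k + d) else best

def usb_alt (key : List Int) (drives : List Int) (b : Int) : Int :=
  let ds := PySem.List.sorted drives (fun d => d) true
  match key.foldl (usbStep b ds) none with
  | none => -1
  | some m => m

-- ===== PRECONDITION & SPEC =====
def Spec_usb (key : List Int) (drives : List Int) (b : Int) (out : Int) : Prop := out = usb_alt key drives b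
instance (key : List Int) (drives : List Int) (b : Int) (out : Int) : Decidable (Spec_usb key drives b out) := by unfold Spec_usb; infer_instance

-- ===== CLAIM (what is proved, stated in full; the proofs are below) =====
def Claim_equal_usb : Prop := ∀ (key : List Int) (drives : List Int) (b : Int), Dom_usb key drives b → Spec_usb key drives b (usb key drives b)

-- ===== LEMMAS AND PROOFS =====

-- max of a nonempty list as an Option (none on []): the value Python's max(count) returns
def mx (l : List Int) : Option Int :=
  match l with
  | [] => none
  | x :: t => some (t.foldl max x)

-- max of two optional values
def omax (a b : Option Int) : Option Int :=
  match a, b with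
  | none, b => b
  | a, none => a
  | some x, some y => some (max x y)

-- the qualifying sums contributed by one key
def cands (drives : List Int) (b k : Int) : List Int :=
  (drives.filter (fun d => decide (k + d ≤ b))).map (fun d => k + d)

theorem mx_spec (l : List Int) (m : Int) : mx l = some m ↔ m ∈ l ∧ ∀ y ∈ l, y ≤ m := by
  cases l with
  | nil => simp [mx]
  | cons x t =>
    simp only [mx, Option.some.injEq]
    constructor
    · rintro rfl
      refine ⟨?_, ?_⟩
      · rcases PySem.List.foldl_max_mem t x with h | h
        · rw [h]; exact List.mem_cons_self
        · exact List.mem_cons_of_mem _ h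
      · intro y hy
        rcases List.mem_cons.mp hy with rfl | hy
        · exact (PySem.List.le_foldl_max t y).1
        · exact (PySem.List.le_foldl_max t x).2 y hy
    · rintro ⟨hm, hub⟩
      apply le_antisymm
      · rcases PySem.List.foldl_max_mem t x with h | h
        · rw [h]; exact hub x List.mem_cons_self
        · exact hub _ (List.mem_cons_of_mem _ h)
      · rcases List.mem_cons.mp hm with rfl | hm
        · exact (PySem.List.le_foldl_max t m).1
        · exact (PySem.List.le_foldl_max t x).2 m hm

theorem mx_none (l : List Int) : mx l = none ↔ l = [] := by
  cases l <;> simp [mx]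

theorem mx_perm {l₁ l₂ : List Int} (h : l₁.Perm l₂) : mx l₁ = mx l₂ := by
  cases h₂ : mx l₂ with
  | none => rw [mx_none] at h₂; subst h₂; rw [mx_none]; exact h.eq_nil
  | some m =>
    rw [mx_spec] at h₂ ⊢
    exact ⟨h.mem_iff.mpr h₂.1, fun y hy => h₂.2 y (h.mem_iff.mp hy)⟩

theorem mx_append (l₁ l₂ : List Int) : mx (l₁ ++ l₂) = omax (mx l₁) (mx l₂) := by
  cases h₁ : mx l₁ with
  | none =>
    rw [mx_none] at h₁; subst h₁; simp [omax]
  | some m₁ =>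
    cases h₂ : mx l₂ with
    | none =>
      rw [mx_none] at h₂; subst h₂; simp [omax, h₁]
    | some m₂ =>
      rw [mx_spec] at h₁ h₂
      simp only [omax]
      rw [mx_spec]
      constructor
      · rcases le_total m₁ m₂ with h | h
        · rw [max_eq_right h]; exact List.mem_append_right _ h₂.1
        · rw [max_eq_left h]; exact List.mem_append_left _ h₁.1
      · intro y hy
        rcases List.mem_append.mp hy with hy | hy
        · exact le_trans (h₁.2 y hy) (le_max_left _ _)
        · exact le_trans (h₂.2 y hy) (le_max_right _ _)

theorem mx_map_add (k : Int) (l : List Int) :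
    mx (l.map (fun d => k + d)) = (mx l).map (fun d => k + d) := by
  cases h : mx l with
  | none => rw [mx_none] at h; subst h; simp [mx]
  | some m =>
    rw [mx_spec] at h
    simp only [Option.map_some]
    rw [mx_spec]
    constructor
    · exact List.mem_map_of_mem h.1
    · intro y hy
      rcases List.mem_map.mp hy with ⟨d, hd, rfl⟩
      have := h.2 d hd
      omega

-- a Python 'for i in range(len(xs)): ... xs[i] ...' loop is the fold over xs
theorem foldl_pyRange_getD {α β : Type} (xs : List α) (d : α) (f : β → α → β) (init : β) :
    (PySem.List.pyRange 0 (PySem.List.len xs)).foldl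
      (fun acc i => f acc (PySem.List.pyGetD xs i d)) init = xs.foldl f init := by
  conv_rhs => rw [← PySem.List.map_pyGetD_pyRange_zero xs d]
  rw [List.foldl_map]

theorem foldl_max_of_ub {t : List Int} {a : Int} (h : ∀ y ∈ t, y ≤ a) : t.foldl max a = a := by
  apply le_antisymm
  · rcases PySem.List.foldl_max_mem t a with he | he
    · rw [he]
    · exact h _ he
  · exact (PySem.List.le_foldl_max t a).1

-- on a descending list, the first element ≤ x is the max of all elements ≤ x
theorem find_desc {ds : List Int} (x : Int) (h : ds.Pairwise (fun a b => b ≤ a)) :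
    ds.find? (fun d => decide (d ≤ x)) = mx (ds.filter (fun d => decide (d ≤ x))) := by
  induction ds with
  | nil => simp [mx]
  | cons d t ih =>
    rcases List.pairwise_cons.mp h with ⟨hd, ht⟩
    by_cases hx : d ≤ x
    · rw [List.find?_cons_of_pos (by simpa using hx), List.filter_cons_of_pos (by simpa using hx)]
      simp only [mx, Option.some.injEq]
      rw [foldl_max_of_ub]
      intro y hy
      exact hd y (List.mem_of_mem_filter hy)
    · rw [List.find?_cons_of_neg (by simpa using hx), List.filter_cons_of_neg (by simpa using hx)]
      exact ih ht

-- B's step computes omax with the max of the key's qualifying sums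
theorem usbStep_eq (drives : List Int) (b k : Int) (acc : Option Int) :
    usbStep b (PySem.List.sorted drives (fun d => d) true) acc k
      = omax acc (mx (cands drives b k)) := by
  set ds := PySem.List.sorted drives (fun d => d) true with hds
  have hperm : (ds.filter (fun d => decide (d ≤ b - k))).Perm
      (drives.filter (fun d => decide (d ≤ b - k))) :=
    (PySem.List.sorted_perm drives (fun d => d) true).filter _
  have hfind : ds.find? (fun d => decide (d ≤ b - k))
      = mx (drives.filter (fun d => decide (d ≤ b - k))) := by
    rw [find_desc (b - k) (PySem.List.sorted_pairwise_rev drives (fun d => d)), mx_perm hperm]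
  have hfilter : drives.filter (fun d => decide (k + d ≤ b))
      = drives.filter (fun d => decide (d ≤ b - k)) := by
    apply List.filter_congr
    intro d _
    simp only [decide_eq_decide]
    omega
  have hc : mx (cands drives b k)
      = (ds.find? (fun d => decide (d ≤ b - k))).map (fun d => k + d) := by
    rw [cands, mx_map_add, hfilter, hfind]
  rw [usbStep]
  cases hf : ds.find? (fun d => decide (d ≤ b - k)) with
  | none =>
    rw [hf] at hc; simp only [Option.map_none] at hc
    rw [hc]; cases acc <;> simp [omax]
  | some d =>
    rw [hf] at hc; simp only [Option.map_some] at hc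
    rw [hc]
    cases acc with
    | none => simp [omax]
    | some m =>
      simp only [omax]
      by_cases hlt : m < k + d
      · simp [hlt, max_eq_right (le_of_lt hlt)]
      · simp [hlt, max_eq_left (le_of_not_gt hlt)]

theorem omax_assoc (a b c : Option Int) : omax (omax a b) c = omax a (omax b c) := by
  cases a <;> cases b <;> cases c <;> simp [omax, max_assoc]

-- B's fold over the keys computes the max of all qualifying sums
theorem foldl_usbStep (drives : List Int) (b : Int) (key : List Int) (acc : Option Int) :
    key.foldl (usbStep b (PySem.List.sorted drives (fun d => d) true)) acc
      = omax acc (mx (key.flatMap (cands drives b))) := by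
  induction key generalizing acc with
  | nil => cases acc <;> simp [mx, omax]
  | cons k ks ih =>
    rw [List.foldl_cons, ih, usbStep_eq, List.flatMap_cons, mx_append, omax_assoc]

-- A's count list is exactly the flatMap of per-key qualifying sums
theorem countA_eq (key drives : List Int) (b : Int) :
    (PySem.List.pyRange 0 (PySem.List.len key)).foldl (fun acc i =>
      (PySem.List.pyRange 0 (PySem.List.len drives)).foldl (fun acc2 j =>
        if PySem.List.pyGetD key i 0 + PySem.List.pyGetD drives j 0 ≤ b then
          acc2 ++ [PySem.List.pyGetD key i 0 + PySem.List.pyGetD drives j 0]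
        else acc2) acc) []
      = key.flatMap (cands drives b) := by
  have inner : ∀ (k : Int) (acc : List Int),
      (PySem.List.pyRange 0 (PySem.List.len drives)).foldl (fun acc2 j =>
        if k + PySem.List.pyGetD drives j 0 ≤ b then
          acc2 ++ [k + PySem.List.pyGetD drives j 0]
        else acc2) acc = acc ++ cands drives b k := by
    intro k acc
    rw [foldl_pyRange_getD drives 0 (fun acc2 x => if k + x ≤ b then acc2 ++ [k + x] else acc2) acc]
    rw [PySem.List.foldl_append_ite (p := fun d => k + d ≤ b) (f := fun d => k + d) drives acc]
    simp only [cands]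
  calc
    (PySem.List.pyRange 0 (PySem.List.len key)).foldl (fun acc i =>
      (PySem.List.pyRange 0 (PySem.List.len drives)).foldl (fun acc2 j =>
        if PySem.List.pyGetD key i 0 + PySem.List.pyGetD drives j 0 ≤ b then
          acc2 ++ [PySem.List.pyGetD key i 0 + PySem.List.pyGetD drives j 0]
        else acc2) acc) []
      = key.foldl (fun acc k => acc ++ cands drives b k) [] := by
        rw [foldl_pyRange_getD key 0
          (fun acc k => (PySem.List.pyRange 0 (PySem.List.len drives)).foldl (fun acc2 j =>
            if k + PySem.List.pyGetD drives j 0 ≤ b then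
              acc2 ++ [k + PySem.List.pyGetD drives j 0]
            else acc2) acc) []]
        apply PySem.List.foldl_congr_mem
        intro acc k _
        exact inner k acc
    _ = key.flatMap (cands drives b) := by
        rw [PySem.List.foldl_append_eq_flatMap]; simp

-- ===== VERDICT (by name: the statement is the Claim_ definition above) =====
theorem usb_spec : Claim_equal_usb := by
  intro key drives b _
  simp only [Spec_usb, usb, usb_alt]
  rw [countA_eq, foldl_usbStep]
  cases hC : mx (key.flatMap (cands drives b)) with
  | none =>
    rw [mx_none] at hC
    simp [hC, omax]
  | some m =>
    have hne : key.flatMap (cands drives b) ≠ [] := by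
      intro h; rw [h] at hC; simp [mx] at hC
    simp only [omax]
    rcases List.exists_cons_of_ne_nil hne with ⟨x, t, hxt⟩
    rw [hxt] at hC ⊢
    simp only [mx, Option.some.injEq] at hC
    rw [PySem.List.max?_id_cons]
    simp [hC]
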